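-- pv_equiv track=rewrite | github.com/Timperator2/WhichCountryIsThis | countryguesser.py | getMergedPlacing
-- ===== SOURCE A (Python) =====
-- def getMergedPlacing(country,result):
--
--     if len(result) > 0:
--
--         current_rank = 1
--         current_score = result[0][1]
--
--         for res in result:
--             if res[1] != current_score:
--                 current_rank = current_rank + 1
--                 current_score = res[1]
--             if res[0] == country:
--                 return current_rank
--
--     return None
-- ===== SOURCE B (Python) =====
-- def getMergedPlacing(country, result):
--     names = [n for n, _ in result]
--     if country not in names:
--         return None
--     idx = names.index(country)
--     scores = [s for _, s in result[:idx + 1]]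
--     return 1 + sum(1 for a, b in zip(scores, scores[1:]) if a != b)
-- ===== Notes on version B (the rewrite author's own statement) =====
-- stated objective: alternative
-- what changed: A's single fused loop carrying (current_rank, current_score) state is replaced by a locate pass (first index of the country in the name list) followed by counting adjacent score transitions in the prefix via zip of consecutive scores; both are O(n) single traversals but B keeps no mutable rank/score state.
import Mathlib
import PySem

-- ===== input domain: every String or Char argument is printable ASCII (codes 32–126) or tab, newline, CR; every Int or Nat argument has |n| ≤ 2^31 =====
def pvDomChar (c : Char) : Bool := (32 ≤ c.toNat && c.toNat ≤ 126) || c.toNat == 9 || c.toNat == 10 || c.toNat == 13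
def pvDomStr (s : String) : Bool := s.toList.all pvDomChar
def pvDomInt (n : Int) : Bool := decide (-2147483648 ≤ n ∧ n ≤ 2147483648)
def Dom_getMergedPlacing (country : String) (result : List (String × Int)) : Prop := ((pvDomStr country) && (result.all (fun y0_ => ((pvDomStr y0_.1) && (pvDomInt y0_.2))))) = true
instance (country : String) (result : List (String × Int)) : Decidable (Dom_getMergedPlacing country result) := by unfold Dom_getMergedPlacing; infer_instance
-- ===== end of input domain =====

-- B replaces A's fused loop carrying (rank, score) state by a locate pass plus a
-- count of adjacent score transitions in the prefix (objective: alternative; same O(n) cost).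

-- ===== PORT A =====
-- the for-loop of A, carrying (current_rank, current_score)
def pvLoopA (country : String) (rank : Int) (score : Int) : List (String × Int) → Option Int
  | [] => none
  | (n, s) :: rest =>
    let rank' := if s ≠ score then rank + 1 else rank
    let score' := if s ≠ score then s else score
    if n == country then some rank' else pvLoopA country rank' score' rest

def getMergedPlacing (country : String) (result : List (String × Int)) : Option Int :=
  match result with
  | [] => none                              -- len(result) == 0: fall through to return None
  | (_, s0) :: _ => pvLoopA country 1 s0 result   -- current_score = result[0][1]

-- ===== PORT B =====
-- sum(1 for a, b in zip(scores, scores[1:]) if a != b)  (0/1-sum = countP)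
def pvTransitions (scores : List Int) : Int :=
  ((scores.zip scores.tail).countP (fun p => p.1 != p.2) : Nat)

def getMergedPlacing_alt (country : String) (result : List (String × Int)) : Option Int :=
  let names := result.map Prod.fst
  match PySem.List.index? names country with    -- 'country not in names' / names.index(country)
  | none => none
  | some idx =>
    let scores := (result.take (idx + 1)).map Prod.snd
    some (1 + pvTransitions scores)

-- ===== PRECONDITION & SPEC =====
def Spec_getMergedPlacing (country : String) (result : List (String × Int)) (out : Option Int) : Prop := out = getMergedPlacing_alt country result
instance (country : String) (result : List (String × Int)) (out : Option Int) : Decidable (Spec_getMergedPlacing country result out) := by unfold Spec_getMergedPlacing; infer_instance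

-- ===== CLAIM (what is proved, stated in full; the proofs are below) =====
def Claim_equal_getMergedPlacing : Prop := ∀ (country : String) (result : List (String × Int)), Dom_getMergedPlacing country result → Spec_getMergedPlacing country result (getMergedPlacing country result)

-- ===== LEMMAS AND PROOFS =====

lemma pvTransitions_cons_cons (a b : Int) (l : List Int) :
    pvTransitions (a :: b :: l) = (if a ≠ b then 1 else 0) + pvTransitions (b :: l) := by
  simp only [pvTransitions, List.tail_cons, List.zip_cons_cons, List.countP_cons]
  by_cases h : a = b <;> simp [h] <;> ring

lemma pvLoopA_eq (country : String) :
    ∀ (l : List (String × Int)) (rank s : Int),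
      pvLoopA country rank s l =
        (PySem.List.index? (l.map Prod.fst) country).map
          (fun idx => rank + pvTransitions (s :: (l.take (idx + 1)).map Prod.snd)) := by
  intro l
  induction l with
  | nil => intro rank s; simp [pvLoopA, PySem.List.index?]
  | cons p rest ih =>
    intro rank s
    obtain ⟨n, s1⟩ := p
    by_cases hn : n = country
    · subst hn
      rw [show PySem.List.index? (((n, s1) :: rest).map Prod.fst) n = some 0 from
        PySem.List.index?_cons_self n (rest.map Prod.fst)]
      simp only [pvLoopA, Option.map_some]
      have h1 : ((n, s1) :: rest).take (0 + 1) = [(n, s1)] := rfl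
      rw [h1]
      simp only [List.map_cons, List.map_nil]
      by_cases hs : s1 = s
      · subst hs; simp [pvTransitions]
      · simp [pvTransitions, hs, Ne.symm hs]
    · have hne : ¬ (n == country) = true := by simp [hn]
      rw [show PySem.List.index? (((n, s1) :: rest).map Prod.fst) country
            = (PySem.List.index? (rest.map Prod.fst) country).map (· + 1) from
          PySem.List.index?_cons_of_ne (rest.map Prod.fst) hn]
      simp only [pvLoopA, hne]
      rw [ih]
      cases h : PySem.List.index? (rest.map Prod.fst) country with
      | none => simp
      | some idx =>
        simp only [Option.map_some]
        have htake : ((n, s1) :: rest).take (idx + 1 + 1) = (n, s1) :: rest.take (idx + 1) := rfl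
        rw [htake]
        simp only [List.map_cons]
        rw [pvTransitions_cons_cons]
        by_cases hs : s1 = s
        · subst hs; simp
        · simp only [ne_eq, hs, not_false_eq_true, if_true, Ne.symm hs]
          simp
          ring

-- ===== VERDICT (by name: the statement is the Claim_ definition above) =====
theorem getMergedPlacing_spec : Claim_equal_getMergedPlacing := by
  intro country result _
  unfold Spec_getMergedPlacing getMergedPlacing getMergedPlacing_alt
  cases result with
  | nil => simp [PySem.List.index?]
  | cons p rest =>
    obtain ⟨n0, s0⟩ := p
    simp only
    rw [pvLoopA_eq]
    cases h : PySem.List.index? (((n0, s0) :: rest).map Prod.fst) country with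
    | none => simp
    | some idx =>
      simp only [Option.map_some]
      congr 1
      have htake : ((n0, s0) :: rest).take (idx + 1) = (n0, s0) :: rest.take idx := rfl
      rw [htake]
      simp only [List.map_cons]
      rw [pvTransitions_cons_cons]
      simp
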